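-- pv_equiv track=rewrite | github.com/mik11231/python | advent2018/Day24/day24.py | parse_modifiers
-- ===== SOURCE A (Python) =====
-- def parse_modifiers(text: str | None):
--     """
--     Run `parse_modifiers` as a clearly documented algorithm stage.
--
--     Methodology:
--     - Treat this function as one deterministic step in the Advent pipeline.
--     - Keep parsing, state transitions, and result emission easy to audit.
--     - Favor explicit control flow so behavior can be reasoned about from docs alone.
--
--     Parameters: text.
--     - Produces side effects required by the caller (output/mutation/control flow).
--     """
--     weak = set()
--     immune = set()
--     if not text:
--         return weak, immune
--     for part in text.split('; '):
--         if part.startswith('weak to '):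
--             weak.update(x.strip() for x in part[len('weak to '):].split(','))
--         elif part.startswith('immune to '):
--             immune.update(x.strip() for x in part[len('immune to '):].split(','))
--     return weak, immune
-- ===== SOURCE B (Python) =====
-- def _collect(parts, prefix):
--     return set(token.strip()
--                for part in parts
--                if part.startswith(prefix)
--                for token in part[len(prefix):].split(','))
--
--
-- def parse_modifiers(text):
--     if not text:
--         return set(), set()
--     parts = text.split('; ')
--     return _collect(parts, 'weak to '), _collect(parts, 'immune to ')
-- ===== Notes on version B (the rewrite author's own statement) =====
-- stated objective: simpler
-- what changed: Replaces A's single fold over the parts with an if/elif dispatch that incrementally updates two mutable sets by two independent filter-and-flatten comprehension passes, each collected into a set in one step by a prefix-parameterized helper.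
import Mathlib
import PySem

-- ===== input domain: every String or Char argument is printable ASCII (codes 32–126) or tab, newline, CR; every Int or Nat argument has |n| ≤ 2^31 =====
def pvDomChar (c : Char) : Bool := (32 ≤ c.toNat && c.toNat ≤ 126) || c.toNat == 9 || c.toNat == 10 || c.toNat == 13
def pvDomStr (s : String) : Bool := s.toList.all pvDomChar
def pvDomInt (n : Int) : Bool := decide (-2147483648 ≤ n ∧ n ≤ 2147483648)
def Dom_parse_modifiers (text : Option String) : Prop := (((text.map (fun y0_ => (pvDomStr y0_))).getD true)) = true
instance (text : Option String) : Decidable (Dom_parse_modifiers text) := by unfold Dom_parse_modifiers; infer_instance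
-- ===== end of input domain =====

-- B replaces the dispatch loop with two independent filter-and-flatten passes (same cost, plainer decomposition).

-- ===== PORT A =====
-- s.split(sep) for a nonempty literal sep: split? is some there; getD [] is never taken
def pmSplit (s sep : String) : List String := (PySem.Str.split? s sep).getD []

def parse_modifiers (text : Option String) : List String × List String :=
  let weak : PySem.Set String := PySem.Set.empty
  let immune : PySem.Set String := PySem.Set.empty
  match text with
  | none => (weak, immune)
  | some t =>
    if t = "" then (weak, immune)
    else
      (pmSplit t "; ").foldl
        (fun wi part =>
          if PySem.Str.startswith part "weak to " then
            (PySem.Set.update wi.1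
              ((pmSplit (PySem.Str.slice part (some 8) none) ",").map PySem.Str.strip),
             wi.2)
          else if PySem.Str.startswith part "immune to " then
            (wi.1,
             PySem.Set.update wi.2
              ((pmSplit (PySem.Str.slice part (some 10) none) ",").map PySem.Str.strip))
          else wi)
        (weak, immune)

-- ===== PORT B =====
-- helper _collect: set() of the flattened comprehension over the matching parts
def pmCollect (parts : List String) (pre : String) : PySem.Set String :=
  PySem.Set.ofList
    ((parts.filter (fun part => PySem.Str.startswith part pre)).flatMap
      (fun part =>
        (pmSplit (PySem.Str.slice part (some (PySem.Str.len pre)) none) ",").map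
          PySem.Str.strip))

def parse_modifiers_alt (text : Option String) : List String × List String :=
  match text with
  | none => (PySem.Set.empty, PySem.Set.empty)
  | some t =>
    if t = "" then (PySem.Set.empty, PySem.Set.empty)
    else
      let parts := pmSplit t "; "
      (pmCollect parts "weak to ", pmCollect parts "immune to ")

-- ===== PRECONDITION & SPEC =====
def Spec_parse_modifiers (text : Option String) (out : List String × List String) : Prop := out = parse_modifiers_alt text
instance (text : Option String) (out : List String × List String) : Decidable (Spec_parse_modifiers text out) := by unfold Spec_parse_modifiers; infer_instance

-- ===== CLAIM (what is proved, stated in full; the proofs are below) =====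
def Claim_equal_parse_modifiers : Prop := ∀ (text : Option String), Dom_parse_modifiers text → Spec_parse_modifiers text (parse_modifiers text)

-- ===== LEMMAS AND PROOFS =====

-- a part starting with 'weak to ' does not start with 'immune to '
lemma pm_excl (p : String) (h : PySem.Str.startswith p "weak to " = true) :
    PySem.Str.startswith p "immune to " = false := by
  by_contra hc
  rw [Bool.not_eq_false] at hc
  simp only [PySem.Str.startswith_eq, PySem.Chars.startswith_iff] at h hc
  have hle : ("weak to ".toList).length ≤ ("immune to ".toList).length := by decide
  have := List.prefix_of_prefix_length_le h hc hle
  revert this; decide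

lemma pm_body8 (p : String) :
    (pmSplit (PySem.Str.slice p (some (PySem.Str.len "weak to ")) none) ",").map PySem.Str.strip
    = (pmSplit (PySem.Str.slice p (some 8) none) ",").map PySem.Str.strip := by
  have h : PySem.Str.len "weak to " = 8 := by decide
  rw [h]

lemma pm_body10 (p : String) :
    (pmSplit (PySem.Str.slice p (some (PySem.Str.len "immune to ")) none) ",").map PySem.Str.strip
    = (pmSplit (PySem.Str.slice p (some 10) none) ",").map PySem.Str.strip := by
  have h : PySem.Str.len "immune to " = 10 := by decide
  rw [h]

-- updating with set(l) is the same as updating with l (duplicates are absorbed by add)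
lemma pm_update_ofList (s : PySem.Set String) (l : List String) :
    PySem.Set.update s (PySem.Set.ofList l) = PySem.Set.update s l := by
  induction l using List.reverseRecOn generalizing s with
  | nil => rfl
  | append_singleton xs x ih =>
    rw [PySem.Set.ofList_append_singleton, PySem.Set.update_append]
    by_cases hx : x ∈ PySem.Set.ofList xs
    · rw [PySem.Set.add_of_mem hx, ih]
      have hx' : x ∈ PySem.Set.update s xs := by
        have hxx : x ∈ xs := by rw [← PySem.Set.mem_ofList]; exact hx
        rw [PySem.Set.mem_update]; exact Or.inr hxx
      rw [PySem.Set.update_cons, PySem.Set.update_nil, PySem.Set.add_of_mem hx']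
    · rw [PySem.Set.add_of_not_mem hx, PySem.Set.update_append, ih]

-- loop invariant: A's fold over the parts equals B's two collected passes, updated onto the accumulators
lemma pm_loop (parts : List String) (w i : PySem.Set String) :
    parts.foldl
      (fun wi part =>
        if PySem.Str.startswith part "weak to " then
          (PySem.Set.update wi.1
            ((pmSplit (PySem.Str.slice part (some 8) none) ",").map PySem.Str.strip),
           wi.2)
        else if PySem.Str.startswith part "immune to " then
          (wi.1,
           PySem.Set.update wi.2
            ((pmSplit (PySem.Str.slice part (some 10) none) ",").map PySem.Str.strip))
        else wi)
      (w, i)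
    = (PySem.Set.update w (pmCollect parts "weak to "),
       PySem.Set.update i (pmCollect parts "immune to ")) := by
  induction parts generalizing w i with
  | nil =>
    simp only [List.foldl_nil, pmCollect, List.filter_nil, List.flatMap_nil,
      PySem.Set.ofList_nil, PySem.Set.update_nil]
  | cons p ps ih =>
    by_cases hw : PySem.Str.startswith p "weak to " = true
    · have hi := pm_excl p hw
      have hfw : (p :: ps).filter (fun part => PySem.Str.startswith part "weak to ")
          = p :: ps.filter (fun part => PySem.Str.startswith part "weak to ") := by
        simp only [List.filter_cons, hw]; simp
      have hfi : (p :: ps).filter (fun part => PySem.Str.startswith part "immune to ")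
          = ps.filter (fun part => PySem.Str.startswith part "immune to ") := by
        simp only [List.filter_cons, hi]; simp
      rw [List.foldl_cons, if_pos hw, ih]
      unfold pmCollect
      rw [hfw, hfi]
      simp only [List.flatMap_cons]
      rw [pm_body8]
      simp only [pm_update_ofList]
      rw [PySem.Set.update_append]
    · by_cases hi : PySem.Str.startswith p "immune to " = true
      · have hw' : PySem.Str.startswith p "weak to " = false := by
          rwa [← Bool.not_eq_true]
        have hfw : (p :: ps).filter (fun part => PySem.Str.startswith part "weak to ")
            = ps.filter (fun part => PySem.Str.startswith part "weak to ") := by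
          simp only [List.filter_cons, hw']; simp
        have hfi : (p :: ps).filter (fun part => PySem.Str.startswith part "immune to ")
            = p :: ps.filter (fun part => PySem.Str.startswith part "immune to ") := by
          simp only [List.filter_cons, hi]; simp
        rw [List.foldl_cons, if_neg hw, if_pos hi, ih]
        unfold pmCollect
        rw [hfw, hfi]
        simp only [List.flatMap_cons]
        rw [pm_body10]
        simp only [pm_update_ofList]
        rw [PySem.Set.update_append]
      · have hw' : PySem.Str.startswith p "weak to " = false := by
          rwa [← Bool.not_eq_true]
        have hi' : PySem.Str.startswith p "immune to " = false := by
          rwa [← Bool.not_eq_true]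
        have hfw : (p :: ps).filter (fun part => PySem.Str.startswith part "weak to ")
            = ps.filter (fun part => PySem.Str.startswith part "weak to ") := by
          simp only [List.filter_cons, hw']; simp
        have hfi : (p :: ps).filter (fun part => PySem.Str.startswith part "immune to ")
            = ps.filter (fun part => PySem.Str.startswith part "immune to ") := by
          simp only [List.filter_cons, hi']; simp
        rw [List.foldl_cons, if_neg hw, if_neg hi, ih]
        unfold pmCollect
        rw [hfw, hfi]

-- ===== VERDICT (by name: the statement is the Claim_ definition above) =====
theorem parse_modifiers_spec : Claim_equal_parse_modifiers := by
  intro text _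
  unfold Spec_parse_modifiers parse_modifiers parse_modifiers_alt
  match text with
  | none => rfl
  | some t =>
    by_cases ht : t = ""
    · simp [ht]
    · simp only [ht, if_false]
      rw [pm_loop]
      unfold pmCollect
      simp only [PySem.Set.empty, PySem.Set.update_nil_left, PySem.Set.ofList_ofList]
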